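-- pv_equiv track=rewrite | github.com/SonicJuice/Recreational-Algorithms | number_series/figurates.py | figurates
-- ===== SOURCE A (Python) =====
-- def figurates(sides, limit):
--     figurate_numbers = []
--     n = 1
--     generate = True
--     while generate:
--         """
--         'P(s, n) = (n * ((s - 2) * n - (s - 4))) / 2', where 's' and 'n' are the number of sides and index of the figurate number.
--         This can be represented by a regular geometrical arrangement of equally spaced points
--         """
--         result = (n * ((sides - 2) * n - (sides - 4))) // 2
--         if result > limit + 1:
--             generate = False
--         else:
--             figurate_numbers.append(result)
--             n += 1
--     """
--     time complexity: 'O(n)'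
--     """
--     return figurate_numbers
-- ===== SOURCE B (Python) =====
-- def figurates(sides, limit):
--     terms = []
--     val = 1            # P(sides, 1) = 1 for every sides
--     inc = sides - 1    # first gnomon increment P(s,2)-P(s,1)
--     while val <= limit + 1:
--         terms.append(val)
--         val += inc
--         inc += sides - 2   # increments grow arithmetically
--     return terms
-- ===== Notes on version B (the rewrite author's own statement) =====
-- stated objective: alternative
-- what changed: B drops the per-term closed form and floor division entirely: it tracks only a running value and a running gnomon increment (second difference sides-2), adding instead of multiplying/dividing, with no index variable and no generate flag.
import Mathlib
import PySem

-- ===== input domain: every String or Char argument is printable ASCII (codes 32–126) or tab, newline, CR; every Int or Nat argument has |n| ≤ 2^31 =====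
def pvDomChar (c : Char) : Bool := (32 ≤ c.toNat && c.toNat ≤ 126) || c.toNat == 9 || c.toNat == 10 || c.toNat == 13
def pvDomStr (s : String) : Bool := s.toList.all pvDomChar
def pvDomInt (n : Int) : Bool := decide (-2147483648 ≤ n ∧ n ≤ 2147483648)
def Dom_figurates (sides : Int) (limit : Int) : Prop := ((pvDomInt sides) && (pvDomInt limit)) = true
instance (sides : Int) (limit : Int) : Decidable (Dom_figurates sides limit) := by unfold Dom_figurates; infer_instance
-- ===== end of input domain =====

-- B replaces A's per-term closed form with floor division by a running value plus a running
-- gnomon increment (two additions per term, no index, no flag): an alternative decomposition.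

-- ===== PORT A =====
-- A's while-loop, fuel-totalized (fuel only makes the loop a total Lean function; it is
-- generous enough that it is never exhausted before the loop's own exit test fires whenever
-- the Python loop terminates).
def figAuxA (sides limit : Int) : Nat → Int → List Int → List Int
  | 0, _, acc => acc
  | f + 1, n, acc =>
      let result := PySem.Int.floordiv (n * ((sides - 2) * n - (sides - 4))) 2
      if result > limit + 1 then acc
      else figAuxA sides limit f (n + 1) (acc ++ [result])

def figurates (sides : Int) (limit : Int) : List Int :=
  figAuxA sides limit (limit.toNat + 3) 1 []

-- ===== PORT B =====
-- B's loop as a cons-producing recursion over the pair (val, inc); same fuel totalization.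
def figAuxB (sides limit : Int) : Nat → Int → Int → List Int
  | 0, _, _ => []
  | f + 1, val, inc =>
      if val ≤ limit + 1 then val :: figAuxB sides limit f (val + inc) (inc + (sides - 2))
      else []

def figurates_alt (sides : Int) (limit : Int) : List Int :=
  figAuxB sides limit (limit.toNat + 3) 1 (sides - 1)

-- ===== PRECONDITION & SPEC =====
def Spec_figurates (sides : Int) (limit : Int) (out : List Int) : Prop := out = figurates_alt sides limit
instance (sides : Int) (limit : Int) (out : List Int) : Decidable (Spec_figurates sides limit out) := by unfold Spec_figurates; infer_instance

-- ===== CLAIM (what is proved, stated in full; the proofs are below) =====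
def Claim_equal_figurates : Prop := ∀ (sides : Int) (limit : Int), Dom_figurates sides limit → Spec_figurates sides limit (figurates sides limit)

-- ===== LEMMAS AND PROOFS =====

-- Loop correspondence: if B's running value val is exactly A's closed-form term at index n
-- (2*val = n*((s-2)*n-(s-4)), always even, so the //2 is exact) and inc is the gnomon
-- increment (s-2)*n+1, then A's accumulator loop equals acc ++ B's cons-built list.
theorem figAux_eq (sides limit : Int) (f : Nat) :
    ∀ (n val inc : Int) (acc : List Int),
      n * ((sides - 2) * n - (sides - 4)) = 2 * val →
      inc = (sides - 2) * n + 1 →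
      figAuxA sides limit f n acc = acc ++ figAuxB sides limit f val inc := by
  induction f with
  | zero => intro n val inc acc _ _; simp [figAuxA, figAuxB]
  | succ f ih =>
      intro n val inc acc hval hinc
      have hres : PySem.Int.floordiv (n * ((sides - 2) * n - (sides - 4))) 2 = val := by
        rw [hval, PySem.Int.floordiv_eq_ediv_of_pos (by omega)]
        omega
      show (if PySem.Int.floordiv (n * ((sides - 2) * n - (sides - 4))) 2 > limit + 1 then acc
            else figAuxA sides limit f (n + 1)
              (acc ++ [PySem.Int.floordiv (n * ((sides - 2) * n - (sides - 4))) 2])) =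
           acc ++ (if val ≤ limit + 1 then
              val :: figAuxB sides limit f (val + inc) (inc + (sides - 2))
            else [])
      rw [hres]
      by_cases hc : val ≤ limit + 1
      · rw [if_neg (by omega), if_pos hc]
        rw [ih (n + 1) (val + inc) (inc + (sides - 2)) (acc ++ [val])
              (by ring_nf; ring_nf at hval hinc; omega) (by rw [hinc]; ring)]
        simp
      · rw [if_pos (by omega), if_neg hc]
        simp

-- ===== VERDICT (by name: the statement is the Claim_ definition above) =====
theorem figurates_spec : Claim_equal_figurates := by
  intro sides limit _
  show figurates sides limit = figurates_alt sides limit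
  have h := figAux_eq sides limit (limit.toNat + 3) 1 1 (sides - 1) [] (by ring) (by ring)
  simpa [figurates, figurates_alt] using h
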